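-- pv_equiv track=rewrite | github.com/aidencullo/problems | problems/CCI/chapterVII/modular.py | swap_min_max
-- ===== SOURCE A (Python) =====
-- def swap_min_max(arr):
--     min_el = float('inf')
--     max_el = float('-inf')
--     min_i = None
--     max_i = None
--     for i, el in enumerate(arr):
--         if el < min_el:
--             min_el = el
--             min_i = i
--         if el > max_el:
--             max_el = el
--             max_i = i
--     arr[max_i], arr[min_i] = arr[min_i], arr[max_i]
--     return arr
-- ===== SOURCE B (Python) =====
-- def swap_min_max(arr):
--     min_i = arr.index(min(arr))
--     max_i = arr.index(max(arr))
--     arr[max_i], arr[min_i] = arr[min_i], arr[max_i]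
--     return arr
-- ===== Notes on version B (the rewrite author's own statement) =====
-- stated objective: idiomatic
-- what changed: B replaces A's single hand-written pass tracking both extrema with sentinel state by the built-ins min/max plus list.index for the first-occurrence positions, then the same tuple swap; Pre_ excludes only the empty list, on which both programs raise (A TypeError, B ValueError).
import Mathlib
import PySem

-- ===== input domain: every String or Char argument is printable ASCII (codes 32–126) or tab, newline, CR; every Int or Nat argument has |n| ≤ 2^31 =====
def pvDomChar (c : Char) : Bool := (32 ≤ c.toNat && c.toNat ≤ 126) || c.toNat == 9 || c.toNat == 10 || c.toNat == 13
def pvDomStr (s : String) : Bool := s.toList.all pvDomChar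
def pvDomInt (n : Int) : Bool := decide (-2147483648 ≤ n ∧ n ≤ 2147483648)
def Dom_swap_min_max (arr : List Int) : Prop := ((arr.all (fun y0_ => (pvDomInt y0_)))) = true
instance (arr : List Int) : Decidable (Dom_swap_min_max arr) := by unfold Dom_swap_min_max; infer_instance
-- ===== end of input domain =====

-- B computes the extrema with min?/max?/index? (Python's min/max/list.index) instead of A's single
-- hand-written pass with sentinel state; both mutate arr in place in Python identically, and the
-- equivalence proved here is about the returned list.


-- ===== PORT A =====
-- loop body of A: state = (min_el, max_el, min_i, max_i); None/float('inf') sentinels become Option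
def pvStepA (s : Option Int × Option Int × Option Int × Option Int) (p : Int × Int) :
    Option Int × Option Int × Option Int × Option Int :=
  let (minEl, minI) :=
    if (match s.1 with | none => true | some m => el_lt p.2 m) then (some p.2, some p.1)
    else (s.1, s.2.2.1)
  let (maxEl, maxI) :=
    if (match s.2.1 with | none => true | some m => el_lt m p.2) then (some p.2, some p.1)
    else (s.2.1, s.2.2.2)
  (minEl, maxEl, minI, maxI)
where el_lt (a b : Int) : Bool := a < b

def swap_min_max (arr : List Int) : List Int :=
  let st := (PySem.List.enumerate arr).foldl pvStepA (none, none, none, none)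
  match st.2.2.1 with
  | none => arr      -- unreachable under Pre_: Python raises TypeError (arr[None]) here
  | some ni =>
      match st.2.2.2 with
      | none => arr  -- unreachable under Pre_
      | some xi =>
          -- arr[max_i], arr[min_i] = arr[min_i], arr[max_i]
          let vmin := arr.getD ni.toNat 0
          let vmax := arr.getD xi.toNat 0
          (arr.set xi.toNat vmin).set ni.toNat vmax

-- ===== PORT B =====
def swap_min_max_alt (arr : List Int) : List Int :=
  match PySem.List.min? arr (fun x => x), PySem.List.max? arr (fun x => x),
        PySem.List.index? arr ((PySem.List.min? arr (fun x => x)).getD 0),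
        PySem.List.index? arr ((PySem.List.max? arr (fun x => x)).getD 0) with
  | some _, some _, some mi, some xi =>
      -- arr[max_i], arr[min_i] = arr[min_i], arr[max_i]
      let vmin := arr.getD mi 0
      let vmax := arr.getD xi 0
      (arr.set xi vmin).set mi vmax
  | _, _, _, _ => arr   -- unreachable under Pre_: Python's min([]) raises ValueError

-- ===== PRECONDITION & SPEC =====
-- Pre_ excludes only the empty list, on which A raises TypeError (and B ValueError).
def Pre_swap_min_max (arr : List Int) : Prop := arr ≠ []
instance (arr : List Int) : Decidable (Pre_swap_min_max arr) := by unfold Pre_swap_min_max; infer_instance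
def pvWitness_swap_min_max : List Int := [3, 1, 2]

def Spec_swap_min_max (arr : List Int) (out : List Int) : Prop := out = swap_min_max_alt arr
instance (arr : List Int) (out : List Int) : Decidable (Spec_swap_min_max arr out) := by unfold Spec_swap_min_max; infer_instance

-- ===== CLAIM (what is proved, stated in full; the proofs are below) =====
def Claim_equal_swap_min_max : Prop := ∀ (arr : List Int), Dom_swap_min_max arr → Pre_swap_min_max arr → Spec_swap_min_max arr (swap_min_max arr)

-- ===== LEMMAS AND PROOFS =====

theorem foldl_min_le {t : List Int} {x z : Int} (hz : z ∈ x :: t) : t.foldl min x ≤ z := by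
  have h := PySem.List.min?_isMin (xs := x :: t) (key := fun y => y)
    (m := t.foldl min x) (by simp [PySem.List.min?_id_cons])
  exact h z hz

theorem le_foldl_max {t : List Int} {x z : Int} (hz : z ∈ x :: t) : z ≤ t.foldl max x := by
  have h := PySem.List.max?_isMax (xs := x :: t) (key := fun y => y)
    (m := t.foldl max x) (by simp [PySem.List.max?_id_cons])
  exact h z hz

-- characterisation of A's fold over a nonempty list
theorem foldA_char (x : Int) (t : List Int) :
    ∃ (ni xi : Nat),
      (PySem.List.enumerate (x :: t)).foldl pvStepA (none, none, none, none)
        = (some (t.foldl min x), some (t.foldl max x), some (ni : Int), some (xi : Int)) ∧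
      PySem.List.index? (x :: t) (t.foldl min x) = some ni ∧
      PySem.List.index? (x :: t) (t.foldl max x) = some xi := by
  induction t using List.reverseRecOn with
  | nil =>
      refine ⟨0, 0, ?_, ?_, ?_⟩ <;>
        simp [PySem.List.enumerate, pvStepA, PySem.List.index?_eq_idxOf?, List.idxOf?]
  | append_singleton t y ih =>
      obtain ⟨ni, xi, hfold, hidxm, hidxM⟩ := ih
      have henum : PySem.List.enumerate (x :: (t ++ [y]))
          = PySem.List.enumerate (x :: t) ++ [(((x :: t).length : Int), y)] := by
        have := PySem.List.enumerate_append (xs := x :: t) (ys := [y]) (s := 0)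
        simpa [PySem.List.enumerate] using this
      have hmin : ∀ z ∈ x :: t, t.foldl min x ≤ z := fun z hz => foldl_min_le hz
      have hmax : ∀ z ∈ x :: t, z ≤ t.foldl max x := fun z hz => le_foldl_max hz
      rw [henum, List.foldl_append, hfold, ← List.cons_append]
      simp only [List.foldl_append, List.foldl_cons, List.foldl_nil]
      by_cases hlt : y < t.foldl min x
      ·  -- new strict minimum at position (x::t).length
        have hnm : y ∉ x :: t := fun hy => absurd (hmin y hy) (by omega)
        have hgt : ¬ t.foldl max x < y := by
          have h1 := hmin x (by simp); have h2 := hmax x (by simp); omega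
        refine ⟨(x :: t).length, xi, ?_, ?_, ?_⟩
        · simp [pvStepA, pvStepA.el_lt, hlt, hgt,
            min_eq_right (le_of_lt hlt), max_eq_left (le_of_not_gt hgt)]
        · rw [min_eq_right (le_of_lt hlt)]
          exact PySem.List.index?_append_singleton_self _ y hnm
        · rw [max_eq_left (le_of_not_gt hgt)]
          exact (PySem.List.index?_append_of_mem _
            ((PySem.List.index?_isSome_iff _ _).mp (by rw [hidxM]; rfl))).trans hidxM
      · by_cases hgt : t.foldl max x < y
        ·  -- new strict maximum at position (x::t).length
          have hnM : y ∉ x :: t := fun hy => absurd (hmax y hy) (by omega)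
          refine ⟨ni, (x :: t).length, ?_, ?_, ?_⟩
          · simp [pvStepA, pvStepA.el_lt, hlt, hgt,
              min_eq_left (le_of_not_gt hlt), max_eq_right (le_of_lt hgt)]
          · rw [min_eq_left (le_of_not_gt hlt)]
            exact (PySem.List.index?_append_of_mem _
              ((PySem.List.index?_isSome_iff _ _).mp (by rw [hidxm]; rfl))).trans hidxm
          · rw [max_eq_right (le_of_lt hgt)]
            exact PySem.List.index?_append_singleton_self _ y hnM
        ·  -- neither extremum changes
          refine ⟨ni, xi, ?_, ?_, ?_⟩
          · simp [pvStepA, pvStepA.el_lt, hlt, hgt,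
              min_eq_left (le_of_not_gt hlt), max_eq_left (le_of_not_gt hgt)]
          · rw [min_eq_left (le_of_not_gt hlt)]
            exact (PySem.List.index?_append_of_mem _
              ((PySem.List.index?_isSome_iff _ _).mp (by rw [hidxm]; rfl))).trans hidxm
          · rw [max_eq_left (le_of_not_gt hgt)]
            exact (PySem.List.index?_append_of_mem _
              ((PySem.List.index?_isSome_iff _ _).mp (by rw [hidxM]; rfl))).trans hidxM

-- ===== VERDICT (by name: the statement is the Claim_ definition above) =====
theorem swap_min_max_spec : Claim_equal_swap_min_max := by
  intro arr _ hpre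
  cases arr with
  | nil => exact absurd rfl hpre
  | cons x t =>
      obtain ⟨ni, xi, hfold, hidxm, hidxM⟩ := foldA_char x t
      unfold Spec_swap_min_max swap_min_max swap_min_max_alt
      rw [hfold]
      simp only [PySem.List.min?_id_cons, PySem.List.max?_id_cons, Option.getD_some, hidxm, hidxM,
        Int.toNat_natCast]
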